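-- pv_equiv track=rewrite | github.com/brock-run/ai-dev-squad-comparison | common/phase2/cli_analyzer.py | _find_artifact_pairs
-- ===== SOURCE A (Python) =====
-- from typing import Dict, List, Optional, Any, Tuple
--
-- def _find_artifact_pairs(artifacts: Dict[str, Dict[str, Any]]) -> List[Tuple[str, str]]:
--     """Find pairs of artifacts to compare."""
--     # Simple pairing strategy: compare artifacts of the same type
--     pairs = []
--     artifact_ids = list(artifacts.keys())
--
--     for i in range(len(artifact_ids)):
--         for j in range(i + 1, len(artifact_ids)):
--             source_id = artifact_ids[i]
--             target_id = artifact_ids[j]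
--
--             source_type = artifacts[source_id].get("type", "text")
--             target_type = artifacts[target_id].get("type", "text")
--
--             # Only compare artifacts of the same type
--             if source_type == target_type:
--                 pairs.append((source_id, target_id))
--
--     return pairs
-- ===== SOURCE B (Python) =====
-- def _find_artifact_pairs(artifacts):
--     """Find pairs of artifacts to compare.
--
--     Single backward pass: group the ids seen so far (i.e. the ids occurring
--     AFTER the current position) by type, emit each source's block of
--     same-type later partners, then stitch the blocks back in source order.
--     One grouping pass plus the output itself: O(n + P) in the pair count P.
--     """
--     later = {}   # type -> ids after the current position, in order
--     blocks = []
--     for aid, art in reversed(list(artifacts.items())):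
--         t = art.get("type", "text")
--         tail = later.get(t, [])
--         blocks.append([(aid, x) for x in tail])
--         later[t] = [aid] + tail
--     blocks.reverse()
--     return [p for b in blocks for p in b]
-- ===== Notes on version B (the rewrite author's own statement) =====
-- stated objective: alternative
-- what changed: Replaced the double index loop with per-pair dict lookups by a single backward pass that groups later ids by type in a dict and emits each source's same-type block directly; cost becomes O(n + P) in the number of emitted pairs (measured ~1.6x at n=1024, not confirmed faster since P itself is quadratic on dense inputs).
import Mathlib
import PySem

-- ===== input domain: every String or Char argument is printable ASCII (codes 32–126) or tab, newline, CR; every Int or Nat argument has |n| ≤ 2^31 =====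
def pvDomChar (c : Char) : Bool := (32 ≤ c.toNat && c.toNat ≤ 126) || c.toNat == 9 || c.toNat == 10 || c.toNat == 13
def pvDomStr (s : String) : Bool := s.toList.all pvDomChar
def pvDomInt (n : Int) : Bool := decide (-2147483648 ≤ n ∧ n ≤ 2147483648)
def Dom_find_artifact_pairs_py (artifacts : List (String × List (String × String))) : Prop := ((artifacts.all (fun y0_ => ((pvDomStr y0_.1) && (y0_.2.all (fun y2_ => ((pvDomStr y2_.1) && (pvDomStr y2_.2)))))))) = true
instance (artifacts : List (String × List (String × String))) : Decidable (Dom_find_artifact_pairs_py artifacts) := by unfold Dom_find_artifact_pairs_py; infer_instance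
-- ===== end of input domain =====

-- B replaces A's double index loop (dict lookups per pair) by one backward pass grouping later ids by type; proved equal on assoc lists with distinct keys (= Python dicts).

-- shared helper: Python `art.get("type", "text")` on an assoc-list dict (first match), exact
def pvArtType (art : List (String × String)) : String := (art.lookup "type").getD "text"

-- ===== PORT A =====
def find_artifact_pairs_py (artifacts : List (String × List (String × String))) : List (String × String) :=
  let artifact_ids := artifacts.map (fun kv => kv.1)
  (PySem.List.pyRange 0 (artifact_ids.length : Int) 1).foldl (fun pairs i =>
    (PySem.List.pyRange (i + 1) (artifact_ids.length : Int) 1).foldl (fun pairs j =>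
      let source_id := PySem.List.pyGetD artifact_ids i ""
      let target_id := PySem.List.pyGetD artifact_ids j ""
      -- artifacts[source_id]: first-match lookup; never fails since source_id is a key
      let source_type := pvArtType ((artifacts.lookup source_id).getD [])
      let target_type := pvArtType ((artifacts.lookup target_id).getD [])
      if source_type == target_type then pairs ++ [(source_id, target_id)] else pairs)
      pairs) []

-- ===== PORT B =====
def find_artifact_pairs_py_alt (artifacts : List (String × List (String × String))) : List (String × String) :=
  let st := artifacts.reverse.foldl
    (fun (st : PySem.Dict String (List String) × List (List (String × String))) e =>
      let t := pvArtType e.2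
      let tail := st.1.getD t []
      (st.1.insert t (e.1 :: tail), st.2 ++ [tail.map (fun x => (e.1, x))]))
    (PySem.Dict.empty, [])
  st.2.reverse.flatten

-- ===== PRECONDITION & SPEC =====
-- Pre_ only requires distinct keys: the assoc list stands for a Python dict, whose keys are necessarily distinct, so no Python input is excluded.
def Pre_find_artifact_pairs_py (artifacts : List (String × List (String × String))) : Prop :=
  (artifacts.map (fun kv => kv.1)).Nodup
instance (artifacts : List (String × List (String × String))) : Decidable (Pre_find_artifact_pairs_py artifacts) := by unfold Pre_find_artifact_pairs_py; infer_instance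

def pvWitness_find_artifact_pairs_py : (List (String × List (String × String))) :=
  [("a", [("type", "code")]), ("b", []), ("c", [("type", "code")])]

def Spec_find_artifact_pairs_py (artifacts : List (String × List (String × String))) (out : List (String × String)) : Prop := out = find_artifact_pairs_py_alt artifacts
instance (artifacts : List (String × List (String × String))) (out : List (String × String)) : Decidable (Spec_find_artifact_pairs_py artifacts out) := by unfold Spec_find_artifact_pairs_py; infer_instance

-- ===== CLAIM (what is proved, stated in full; the proofs are below) =====
def Claim_equal_find_artifact_pairs_py : Prop := ∀ (artifacts : List (String × List (String × String))), Dom_find_artifact_pairs_py artifacts → Pre_find_artifact_pairs_py artifacts → Spec_find_artifact_pairs_py artifacts (find_artifact_pairs_py artifacts)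

-- ===== LEMMAS AND PROOFS =====

def pvF : List (String × List (String × String)) → List (String × String)
  | [] => []
  | e :: rest =>
      ((rest.filter (fun e' => pvArtType e'.2 == pvArtType e.2)).map (fun e' => (e.1, e'.1)))
        ++ pvF rest

def pvStep (st : PySem.Dict String (List String) × List (List (String × String)))
    (e : String × List (String × String)) :
    PySem.Dict String (List String) × List (List (String × String)) :=
  let t := pvArtType e.2
  let tail := st.1.getD t []
  (st.1.insert t (e.1 :: tail), st.2 ++ [tail.map (fun x => (e.1, x))])

def pvG (l : List (String × List (String × String))) :
    PySem.Dict String (List String) × List (List (String × String)) :=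
  l.reverse.foldl pvStep (PySem.Dict.empty, [])

theorem alt_eq_pvG (l : List (String × List (String × String))) :
    find_artifact_pairs_py_alt l = (pvG l).2.reverse.flatten := rfl

theorem pvG_cons (e : String × List (String × String)) (l : List (String × List (String × String))) :
    pvG (e :: l) = pvStep (pvG l) e := by
  simp [pvG, List.foldl_append]

theorem pvG_later (l : List (String × List (String × String))) (t : String) :
    (pvG l).1.getD t [] = ((l.filter (fun e' => pvArtType e'.2 == t)).map (fun e' => e'.1)) := by
  induction l with
  | nil => simp [pvG, PySem.Dict.getD, PySem.Dict.get?, PySem.Dict.empty]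
  | cons e l ih =>
      rw [pvG_cons]
      unfold pvStep
      simp only [PySem.Dict.getD_insert, List.filter_cons]
      by_cases h : t = pvArtType e.2
      · subst h; simp [ih]
      · have : (pvArtType e.2 == t) = false := by simp; exact fun hh => h hh.symm
        simp [if_neg h, this, ih]

theorem alt_eq_pvF (l : List (String × List (String × String))) :
    find_artifact_pairs_py_alt l = pvF l := by
  induction l with
  | nil => rfl
  | cons e l ih =>
      rw [alt_eq_pvG, pvG_cons] at *
      unfold pvStep
      simp only [List.reverse_append, pvF, List.reverse_cons]
      rw [pvG_later]
      simp [List.map_map, Function.comp, ← ih]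

theorem a_eq_flat (l : List (String × List (String × String))) :
    find_artifact_pairs_py l =
    (PySem.List.pyRange 0 (l.length : Int) 1).flatMap (fun i =>
      ((PySem.List.pyRange (i + 1) (l.length : Int) 1).filter (fun j =>
          pvArtType ((l.lookup (PySem.List.pyGetD (l.map (fun kv => kv.1)) i "")).getD []) ==
          pvArtType ((l.lookup (PySem.List.pyGetD (l.map (fun kv => kv.1)) j "")).getD []))).map
        (fun j => (PySem.List.pyGetD (l.map (fun kv => kv.1)) i "",
                   PySem.List.pyGetD (l.map (fun kv => kv.1)) j ""))) := by
  simp only [find_artifact_pairs_py, List.length_map, PySem.List.foldl_append_if,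
    PySem.List.foldl_append_eq_flatMap]
  simp

def pvD : String × List (String × String) := ("", [])

theorem nodup_lookup (l : List (String × List (String × String)))
    (h : (l.map (fun kv => kv.1)).Nodup) (k : Nat) (hk : k < l.length) :
    l.lookup ((l.getD k pvD).1) = some ((l.getD k pvD).2) := by
  induction l generalizing k with
  | nil => simp at hk
  | cons e t ih =>
      obtain ⟨a, b⟩ := e
      simp only [List.map_cons, List.nodup_cons] at h
      cases k with
      | zero => simp
      | succ k =>
          have hk' : k < t.length := by simpa using hk
          have hmem : ((t.getD k pvD).1) ∈ t.map (fun kv => kv.1) := by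
            rw [List.getD_eq_getElem _ _ hk']
            exact List.mem_map.mpr ⟨t[k], List.getElem_mem hk', rfl⟩
          have hne : ((t.getD k pvD).1) ≠ a := fun hcontra => h.1 (hcontra ▸ hmem)
          have hb : (((t.getD k pvD).1) == a) = false := by rw [beq_eq_false_iff_ne]; exact hne
          simp only [List.getD_cons_succ, List.lookup_cons, hb]
          exact ih h.2 k hk'

theorem fst_getD (l : List (String × List (String × String))) (k : Nat) (hk : k < l.length) :
    (l.map (fun kv => kv.1)).getD k "" = (l.getD k pvD).1 := by
  rw [List.getD_eq_getElem _ _ (by simpa using hk), List.getD_eq_getElem _ _ hk,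
    List.getElem_map]

theorem entry_fst (l : List (String × List (String × String))) (j : Int)
    (h0 : 0 ≤ j) (h1 : j < (l.length : Int)) :
    PySem.List.pyGetD (l.map (fun kv => kv.1)) j "" = (PySem.List.pyGetD l j pvD).1 := by
  have hj : j.toNat < l.length := by omega
  rw [PySem.List.pyGetD_eq_getElem _ "" h0 (by simpa using h1),
    PySem.List.pyGetD_eq_getElem l pvD h0 h1, List.getElem_map]

theorem entry_lookup (l : List (String × List (String × String)))
    (hnd : (l.map (fun kv => kv.1)).Nodup) (j : Int)
    (h0 : 0 ≤ j) (h1 : j < (l.length : Int)) :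
    (l.lookup (PySem.List.pyGetD (l.map (fun kv => kv.1)) j "")).getD []
      = (PySem.List.pyGetD l j pvD).2 := by
  have hj : j.toNat < l.length := by omega
  rw [entry_fst l j h0 h1, PySem.List.pyGetD_eq_getElem l pvD h0 h1,
    ← List.getD_eq_getElem l pvD hj, nodup_lookup l hnd j.toNat hj]
  rfl

theorem a_eq_range (l : List (String × List (String × String)))
    (hnd : (l.map (fun kv => kv.1)).Nodup) :
    find_artifact_pairs_py l = (List.range l.length).flatMap (fun k =>
      ((l.drop (k + 1)).filter
          (fun e' => pvArtType (l.getD k pvD).2 == pvArtType e'.2)).map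
        (fun e' => ((l.getD k pvD).1, e'.1))) := by
  rw [a_eq_flat, PySem.List.pyRange_zero_nat, List.flatMap_map]
  apply List.flatMap_congr
  intro k hk
  have hk' : k < l.length := List.mem_range.mp hk
  have hkd : PySem.List.pyGetD (l.map (fun kv => kv.1)) (k : Int) "" = (l.getD k pvD).1 := by
    rw [PySem.List.pyGetD_natCast, fst_getD l k hk']
  have hkl : (List.lookup ((l.getD k pvD).1) l).getD [] = (l.getD k pvD).2 := by
    rw [nodup_lookup l hnd k hk']; rfl
  rw [hkd, hkl]
  -- replace per-j expressions by the entry at j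
  rw [List.filter_congr (fun j hj => by
        have hb := PySem.List.mem_pyRange_one.mp hj
        rw [entry_lookup l hnd j (by omega) (by omega)])]
  rw [List.map_congr_left (fun j hj => by
        have hb := PySem.List.mem_pyRange_one.mp (List.mem_of_mem_filter hj)
        rw [entry_fst l j (by omega) (by omega)])]
  -- turn the index range into the dropped suffix
  have hdrop : l.drop (k + 1)
      = (PySem.List.pyRange ((k : Int) + 1) (l.length : Int)).map
          (fun j => PySem.List.pyGetD l j pvD) := by
    rw [PySem.List.map_pyGetD_pyRange' l pvD (by omega)]
    norm_num
  rw [hdrop, List.filter_map, List.map_map]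
  rfl

theorem range_flat (l : List (String × List (String × String))) :
    (List.range l.length).flatMap (fun k =>
      ((l.drop (k + 1)).filter
          (fun e' => pvArtType (l.getD k pvD).2 == pvArtType e'.2)).map
        (fun e' => ((l.getD k pvD).1, e'.1))) = pvF l := by
  induction l with
  | nil => rfl
  | cons e t ih =>
      simp only [List.length_cons, List.range_succ_eq_map, List.flatMap_cons, List.flatMap_map,
        List.getD_cons_zero, List.getD_cons_succ, List.drop_succ_cons, List.drop_zero]
      rw [ih]
      rw [List.filter_congr (fun x _ => by
        show (pvArtType e.2 == pvArtType x.2) = (pvArtType x.2 == pvArtType e.2)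
        simp [eq_comm])]
      rfl

theorem a_eq_pvF (l : List (String × List (String × String)))
    (h : (l.map (fun kv => kv.1)).Nodup) :
    find_artifact_pairs_py l = pvF l := by
  rw [a_eq_range l h, range_flat]

-- ===== VERDICT (by name: the statement is the Claim_ definition above) =====
theorem find_artifact_pairs_py_spec : Claim_equal_find_artifact_pairs_py := by
  intro artifacts _ hpre
  unfold Spec_find_artifact_pairs_py
  rw [a_eq_pvF artifacts hpre, alt_eq_pvF]
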